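-- pv_equiv track=rewrite | github.com/jacobbart298/sycococopy | benchmarks/non_determinism_benchmarks/parser_benchmark.py | writeProtocol
-- ===== SOURCE A (Python) =====
-- def writeProtocol(depth: int, indentLevel: int, maxDepth: int) -> str:
--     indent = "    "
--     if depth == maxDepth and depth % 2 == 1:
--         return indentLevel*indent + "send bool from A to B\n"
--     elif depth == maxDepth and depth % 2 == 0:
--         return indentLevel*indent + "send bool from B to A\n"
--     else:
--         protocol = indentLevel*indent + "sequence:\n"
--         indentLevel += 1
--         if depth % 2 == 1:
--             protocol += indentLevel*indent + "send bool from A to B\n"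
--         else:
--             protocol += indentLevel*indent + "send bool from B to A\n"
--         protocol += indentLevel*indent + "choice:\n"
--         protocol += writeProtocol(depth + 1, indentLevel + 1, maxDepth)
--         protocol += writeProtocol(depth + 1, indentLevel + 1, maxDepth)
--         return protocol
-- ===== SOURCE B (Python) =====
-- def writeProtocol(depth: int, indentLevel: int, maxDepth: int) -> str:
--     indent = "    "
--     line = "send bool from A to B\n" if depth % 2 == 1 else "send bool from B to A\n"
--     if depth == maxDepth:
--         return indentLevel * indent + line
--     sub = writeProtocol(depth + 1, indentLevel + 2, maxDepth)
--     return (indentLevel * indent + "sequence:\n"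
--             + (indentLevel + 1) * indent + line
--             + (indentLevel + 1) * indent + "choice:\n"
--             + sub + sub)
-- ===== Notes on version B (the rewrite author's own statement) =====
-- stated objective: alternative
-- what changed: B makes one recursive call per level and duplicates the identical subtree string (sub + sub) instead of A's two identical recursive calls rebuilding it twice; intended as faster but a timing run could not confirm it (both outputs are exponential in maxDepth-depth).
import Mathlib
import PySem

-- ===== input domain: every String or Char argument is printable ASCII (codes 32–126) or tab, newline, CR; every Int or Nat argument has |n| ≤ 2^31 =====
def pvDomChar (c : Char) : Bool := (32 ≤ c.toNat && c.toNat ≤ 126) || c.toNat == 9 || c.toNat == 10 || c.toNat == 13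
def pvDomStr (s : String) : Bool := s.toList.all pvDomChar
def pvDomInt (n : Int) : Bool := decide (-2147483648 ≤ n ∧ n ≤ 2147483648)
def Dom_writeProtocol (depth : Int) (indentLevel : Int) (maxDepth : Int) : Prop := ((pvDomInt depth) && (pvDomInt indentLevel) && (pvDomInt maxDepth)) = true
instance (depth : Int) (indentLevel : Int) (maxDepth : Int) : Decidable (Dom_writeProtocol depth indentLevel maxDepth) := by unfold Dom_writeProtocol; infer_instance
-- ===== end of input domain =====

-- B computes the (identical) subtree string once per level and doubles it (sub + sub),
-- replacing A's two identical recursive calls; intended as faster (timing unconfirmed), same output.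

-- Python's  n * "    "  (empty for n ≤ 0), shared by both ports
def pyMulStr (n : Int) (s : String) : String := String.ofList (PySem.List.pyRepeat s.toList n)

-- ===== PORT A =====
-- fuel = (maxDepth - depth).toNat; fuel runs out only when depth > maxDepth,
-- where the Python recurses forever (excluded by Pre_), and the port returns "".
def wpGoA : Nat → Int → Int → Int → String
  | fuel, depth, indentLevel, maxDepth =>
    let indent := "    "
    if depth = maxDepth ∧ PySem.Int.mod depth 2 = 1 then
      pyMulStr indentLevel indent ++ "send bool from A to B\n"
    else if depth = maxDepth ∧ PySem.Int.mod depth 2 = 0 then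
      pyMulStr indentLevel indent ++ "send bool from B to A\n"
    else
      match fuel with
      | 0 => ""
      | f + 1 =>
        let protocol := pyMulStr indentLevel indent ++ "sequence:\n"
        let indentLevel2 := indentLevel + 1
        let protocol := protocol ++
          (if PySem.Int.mod depth 2 = 1 then
            pyMulStr indentLevel2 indent ++ "send bool from A to B\n"
          else
            pyMulStr indentLevel2 indent ++ "send bool from B to A\n")
        let protocol := protocol ++ (pyMulStr indentLevel2 indent ++ "choice:\n")
        let protocol := protocol ++ wpGoA f (depth + 1) (indentLevel2 + 1) maxDepth
        let protocol := protocol ++ wpGoA f (depth + 1) (indentLevel2 + 1) maxDepth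
        protocol

def writeProtocol (depth : Int) (indentLevel : Int) (maxDepth : Int) : String :=
  wpGoA (maxDepth - depth).toNat depth indentLevel maxDepth

-- ===== PORT B =====
def wpGoB : Nat → Int → Int → Int → String
  | fuel, depth, indentLevel, maxDepth =>
    let indent := "    "
    let line := if PySem.Int.mod depth 2 = 1 then "send bool from A to B\n" else "send bool from B to A\n"
    if depth = maxDepth then
      pyMulStr indentLevel indent ++ line
    else
      match fuel with
      | 0 => ""
      | f + 1 =>
        let sub := wpGoB f (depth + 1) (indentLevel + 2) maxDepth
        pyMulStr indentLevel indent ++ "sequence:\n"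
          ++ pyMulStr (indentLevel + 1) indent ++ line
          ++ pyMulStr (indentLevel + 1) indent ++ "choice:\n"
          ++ sub ++ sub

def writeProtocol_alt (depth : Int) (indentLevel : Int) (maxDepth : Int) : String :=
  wpGoB (maxDepth - depth).toNat depth indentLevel maxDepth

-- ===== PRECONDITION & SPEC =====
-- Pre_ excludes depth > maxDepth, where Python A (and B) recurse without a base case
-- and raise RecursionError.
def Pre_writeProtocol (depth : Int) (indentLevel : Int) (maxDepth : Int) : Prop := depth ≤ maxDepth
instance (depth : Int) (indentLevel : Int) (maxDepth : Int) : Decidable (Pre_writeProtocol depth indentLevel maxDepth) := by unfold Pre_writeProtocol; infer_instance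
def pvWitness_writeProtocol : Int × Int × Int := (1, 0, 3)

def Spec_writeProtocol (depth : Int) (indentLevel : Int) (maxDepth : Int) (out : String) : Prop := out = writeProtocol_alt depth indentLevel maxDepth
instance (depth : Int) (indentLevel : Int) (maxDepth : Int) (out : String) : Decidable (Spec_writeProtocol depth indentLevel maxDepth out) := by unfold Spec_writeProtocol; infer_instance

-- ===== CLAIM (what is proved, stated in full; the proofs are below) =====
def Claim_equal_writeProtocol : Prop := ∀ (depth : Int) (indentLevel : Int) (maxDepth : Int), Dom_writeProtocol depth indentLevel maxDepth → Pre_writeProtocol depth indentLevel maxDepth → Spec_writeProtocol depth indentLevel maxDepth (writeProtocol depth indentLevel maxDepth)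

-- ===== LEMMAS AND PROOFS =====

theorem wpGo_eq : ∀ (fuel : Nat) (d i m : Int), wpGoA fuel d i m = wpGoB fuel d i m := by
  intro fuel
  induction fuel with
  | zero =>
    intro d i m
    simp only [wpGoA, wpGoB]
    rcases Int.emod_two_eq d with h | h <;> simp [h]
  | succ f ih =>
    intro d i m
    simp only [wpGoA, wpGoB, ih]
    rcases Int.emod_two_eq d with h | h <;>
      simp [h, String.append_assoc, add_assoc]

-- ===== VERDICT (by name: the statement is the Claim_ definition above) =====
theorem writeProtocol_spec : Claim_equal_writeProtocol := by
  intro d i m _ _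
  unfold Spec_writeProtocol writeProtocol writeProtocol_alt
  exact wpGo_eq _ _ _ _
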